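-- pv_equiv track=rewrite | github.com/Installus2/BowlingManager2022 | dannyHelper.py | additionalSigns
-- ===== SOURCE A (Python) =====
-- def additionalSigns(inputString, isEqualSign = False):
--     returnString = "" # Make a blank string
--     if isEqualSign:
--         for i in range(0, len(inputString)):
--             returnString += "=" # Add a sign for each individual character in the input string
--     else:
--         for i in range(0, len(inputString)):
--             returnString += "-"
--     return returnString
-- ===== SOURCE B (Python) =====
-- def additionalSigns(inputString, isEqualSign = False):
--     # Closed form: pick the sign and repeat it once via string multiplication.
--     return ('=' if isEqualSign else '-') * len(inputString)
-- ===== Notes on version B (the rewrite author's own statement) =====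
-- stated objective: idiomatic
-- what changed: Replaced the per-character accumulation loop with duplicated branches by a single closed-form expression: conditional sign choice times len(inputString) (string repetition instead of iterated append).
import Mathlib
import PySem

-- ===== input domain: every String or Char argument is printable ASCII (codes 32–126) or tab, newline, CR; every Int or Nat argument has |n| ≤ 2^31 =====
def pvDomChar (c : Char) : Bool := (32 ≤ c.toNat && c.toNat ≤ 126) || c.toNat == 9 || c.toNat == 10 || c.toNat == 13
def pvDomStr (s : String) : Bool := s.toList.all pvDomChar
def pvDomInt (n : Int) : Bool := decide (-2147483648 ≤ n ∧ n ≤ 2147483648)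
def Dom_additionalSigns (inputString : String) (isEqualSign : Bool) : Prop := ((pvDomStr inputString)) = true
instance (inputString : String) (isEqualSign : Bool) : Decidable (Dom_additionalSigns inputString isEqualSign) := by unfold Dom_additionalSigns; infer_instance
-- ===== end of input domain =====

-- B replaces A's per-character append loop (duplicated per branch) by a single
-- closed-form expression: the chosen sign repeated len(inputString) times (idiomatic).

-- ===== PORT A =====
-- returnString = ""; if isEqualSign: for i in range(0, len(inputString)): returnString += "="
-- else: for i in range(0, len(inputString)): returnString += "-"; return returnString
def additionalSigns (inputString : String) (isEqualSign : Bool) : String :=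
  let returnString : String := ""
  if isEqualSign then
    (PySem.List.pyRange 0 (PySem.Str.len inputString) 1).foldl
      (fun returnString _i => returnString ++ "=") returnString
  else
    (PySem.List.pyRange 0 (PySem.Str.len inputString) 1).foldl
      (fun returnString _i => returnString ++ "-") returnString

-- ===== PORT B =====
-- return ('=' if isEqualSign else '-') * len(inputString)
def additionalSigns_alt (inputString : String) (isEqualSign : Bool) : String :=
  String.ofList (PySem.List.pyRepeat [if isEqualSign then '=' else '-'] (PySem.Str.len inputString))

-- ===== PRECONDITION & SPEC =====
def Spec_additionalSigns (inputString : String) (isEqualSign : Bool) (out : String) : Prop := out = additionalSigns_alt inputString isEqualSign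
instance (inputString : String) (isEqualSign : Bool) (out : String) : Decidable (Spec_additionalSigns inputString isEqualSign out) := by unfold Spec_additionalSigns; infer_instance

-- ===== CLAIM (what is proved, stated in full; the proofs are below) =====
def Claim_equal_additionalSigns : Prop := ∀ (inputString : String) (isEqualSign : Bool), Dom_additionalSigns inputString isEqualSign → Spec_additionalSigns inputString isEqualSign (additionalSigns inputString isEqualSign)

-- ===== LEMMAS AND PROOFS =====

-- Folding "append one copy of ch" over any list appends l.length copies of ch.
theorem fold_append_replicate (ch : String) (l : List Int) (acc : String) :
    (l.foldl (fun a (_ : Int) => a ++ ch) acc).toList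
      = acc.toList ++ (List.replicate l.length ch.toList).flatten := by
  induction l generalizing acc with
  | nil => simp
  | cons x xs ih =>
      simp [List.foldl_cons, ih, List.replicate_succ]

theorem string_eq_of_toList {a b : String} (h : a.toList = b.toList) : a = b := by
  simpa using congrArg String.ofList h

theorem additionalSigns_spec : Claim_equal_additionalSigns := by
  intro s b _
  unfold Spec_additionalSigns additionalSigns additionalSigns_alt
  cases b
  · apply string_eq_of_toList
    show (List.foldl (fun a (_ : Int) => a ++ "-") ""
        (PySem.List.pyRange 0 (PySem.Str.len s) 1)).toList
      = (String.ofList (PySem.List.pyRepeat ['-'] (PySem.Str.len s))).toList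
    rw [fold_append_replicate]
    simp [PySem.List.length_pyRange_one, PySem.List.pyRepeat_singleton]
  · apply string_eq_of_toList
    show (List.foldl (fun a (_ : Int) => a ++ "=") ""
        (PySem.List.pyRange 0 (PySem.Str.len s) 1)).toList
      = (String.ofList (PySem.List.pyRepeat ['='] (PySem.Str.len s))).toList
    rw [fold_append_replicate]
    simp [PySem.List.length_pyRange_one, PySem.List.pyRepeat_singleton]
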